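-- pv_equiv track=rewrite | github.com/zym2048/Directional-Renal-Lesion-Segmentation | prepare/get_volumes_from_slices.py | reduce_volumes
-- ===== SOURCE A (Python) =====
-- def reduce_volumes(image_list: list):
--     def volume_in_list(l, v):
--         for i in l:
--             if (i[0]-v[0]) < 10 and (i[1]-v[1]) < 10 and (i[2]-v[2]) < 10:
--                 return True
--         return False
--     new_list = []
--     for i in image_list:
--         if not volume_in_list(new_list, i):
--             new_list.append(i)
--     return new_list
-- ===== SOURCE B (Python) =====
-- def reduce_volumes(image_list: list):
--     # Sieve: repeatedly keep the first remaining point and filter out of the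
--     # remaining list every point it dominates (all three diffs < 10).
--     out = []
--     pending = image_list
--     while pending:
--         head = pending[0]
--         out.append(head)
--         pending = [y for y in pending[1:]
--                    if not ((head[0]-y[0]) < 10 and (head[1]-y[1]) < 10 and (head[2]-y[2]) < 10)]
--     return out
-- ===== Notes on version B (the rewrite author's own statement) =====
-- stated objective: alternative
-- what changed: replaces A's accumulator greedy (each candidate scanned against every already-kept point) by a sieve that repeatedly keeps the head of the remaining list and filters out every remaining point the head dominates
-- outside the precondition, e.g. on reduce_volumes([[20], [0]]): A returns [[20], [0]], B returns [[20], [0]]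
import Mathlib
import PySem

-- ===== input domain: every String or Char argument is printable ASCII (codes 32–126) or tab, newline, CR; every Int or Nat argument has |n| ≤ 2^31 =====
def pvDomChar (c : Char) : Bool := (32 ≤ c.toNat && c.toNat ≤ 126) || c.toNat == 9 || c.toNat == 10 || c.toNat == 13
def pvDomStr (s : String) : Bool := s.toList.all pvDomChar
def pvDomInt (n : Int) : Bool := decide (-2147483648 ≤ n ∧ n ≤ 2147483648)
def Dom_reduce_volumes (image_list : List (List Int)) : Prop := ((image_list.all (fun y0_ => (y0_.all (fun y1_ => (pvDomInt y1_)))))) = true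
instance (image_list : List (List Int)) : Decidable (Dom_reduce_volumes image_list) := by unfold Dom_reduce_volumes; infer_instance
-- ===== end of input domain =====

-- B is an alternative (sieve-style) exact re-implementation of A's greedy dedup; equal return values proved on Pre_ (no mutation of the argument in either program).

-- l[k] for k in 0..2; exact where the index is in range (Pre_ guarantees that whenever Python evaluates it)
def pyAt (l : List Int) (k : Nat) : Int := (PySem.List.pyGet? l (k : Int)).getD 0

-- ===== PORT A =====
-- A's inner helper volume_in_list: linear scan of the kept list
def rv_inlist (l : List (List Int)) (v : List Int) : Bool :=
  match l with
  | [] => false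
  | i :: rest =>
    if pyAt i 0 - pyAt v 0 < 10 ∧ pyAt i 1 - pyAt v 1 < 10 ∧ pyAt i 2 - pyAt v 2 < 10 then
      true
    else
      rv_inlist rest v

def reduce_volumes (image_list : List (List Int)) : List (List Int) :=
  image_list.foldl (fun new_list i => if rv_inlist new_list i then new_list else new_list ++ [i]) []

-- ===== PORT B =====
def rv_dom (x y : List Int) : Bool :=
  decide (pyAt x 0 - pyAt y 0 < 10) && decide (pyAt x 1 - pyAt y 1 < 10) && decide (pyAt x 2 - pyAt y 2 < 10)

-- Source B's while loop: keep the head, filter the dominated points out of the rest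
def reduce_volumes_alt (image_list : List (List Int)) : List (List Int) :=
  match image_list with
  | [] => []
  | head :: rest => head :: reduce_volumes_alt (rest.filter (fun y => !(rv_dom head y)))
termination_by image_list.length
decreasing_by
  simpa using Nat.lt_succ_of_le (le_trans (List.length_filter_le _ _) (le_of_eq (List.length_attach)))

-- ===== PRECONDITION & SPEC =====
-- Pre_ excludes multi-element lists containing an inner list shorter than 3: there Python A
-- raises IndexError for most values (it may accidentally return when the first comparison
-- short-circuits to False, e.g. [[20],[0]]).
def Pre_reduce_volumes (image_list : List (List Int)) : Prop :=
  image_list.length ≤ 1 ∨ ∀ v ∈ image_list, 3 ≤ v.length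

instance (image_list : List (List Int)) : Decidable (Pre_reduce_volumes image_list) := by
  unfold Pre_reduce_volumes; infer_instance

def pvWitness_reduce_volumes : List (List Int) := [[0, 0, 0], [100, 100, 100], [101, 101, 101]]

def Spec_reduce_volumes (image_list : List (List Int)) (out : List (List Int)) : Prop := out = reduce_volumes_alt image_list
instance (image_list : List (List Int)) (out : List (List Int)) : Decidable (Spec_reduce_volumes image_list out) := by unfold Spec_reduce_volumes; infer_instance

-- ===== CLAIM (what is proved, stated in full; the proofs are below) =====
def Claim_equal_reduce_volumes : Prop := ∀ (image_list : List (List Int)), Dom_reduce_volumes image_list → Pre_reduce_volumes image_list → Spec_reduce_volumes image_list (reduce_volumes image_list)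

-- ===== LEMMAS AND PROOFS =====

lemma rv_inlist_singleton (x v : List Int) : rv_inlist [x] v = rv_dom x v := by
  simp [rv_inlist, rv_dom, Bool.and_assoc]

lemma rv_inlist_append (a b : List (List Int)) (v : List Int) :
    rv_inlist (a ++ b) v = (rv_inlist a v || rv_inlist b v) := by
  induction a with
  | nil => simp [rv_inlist]
  | cons i rest ih =>
    by_cases h : pyAt i 0 - pyAt v 0 < 10 ∧ pyAt i 1 - pyAt v 1 < 10 ∧ pyAt i 2 - pyAt v 2 < 10
    · simp [rv_inlist, h]
    · simp [rv_inlist, h, ih]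

lemma foldl_eq_sieve (pending : List (List Int)) :
    ∀ acc : List (List Int),
      pending.foldl (fun new_list i => if rv_inlist new_list i then new_list else new_list ++ [i]) acc
        = acc ++ reduce_volumes_alt (pending.filter (fun y => !(rv_inlist acc y))) := by
  induction pending with
  | nil => intro acc; simp [reduce_volumes_alt.eq_def]
  | cons i rest ih =>
    intro acc
    by_cases h : rv_inlist acc i = true
    · simp only [List.foldl_cons, List.filter_cons, h, if_true, Bool.not_true,
        Bool.false_eq_true, if_false]
      exact ih acc
    · have hb : rv_inlist acc i = false := by simpa using h
      simp only [List.foldl_cons, List.filter_cons, hb, Bool.not_false, if_true,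
        Bool.false_eq_true, if_false]
      rw [ih (acc ++ [i])]
      have hfilter :
          rest.filter (fun y => !(rv_inlist (acc ++ [i]) y))
            = (rest.filter (fun y => !(rv_inlist acc y))).filter (fun y => !(rv_dom i y)) := by
        rw [List.filter_filter]
        apply List.filter_congr
        intro y _
        simp [rv_inlist_append, rv_inlist_singleton, Bool.and_comm]
      rw [hfilter]
      conv_rhs => rw [reduce_volumes_alt.eq_def]
      simp

lemma rv_inlist_nil (v : List Int) : rv_inlist [] v = false := rfl

-- ===== VERDICT (by name: the statement is the Claim_ definition above) =====
theorem reduce_volumes_spec : Claim_equal_reduce_volumes := by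
  intro image_list _ _
  unfold Spec_reduce_volumes reduce_volumes
  rw [foldl_eq_sieve image_list []]
  simp [rv_inlist_nil]
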